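-- pv_equiv track=rewrite | github.com/CodecoolMSC2016/python-lightweight-erp-3rd-tw-godlike-hedgehog-sq4d | selling/selling.py | get_lowest_price_item_id
-- ===== SOURCE A (Python) =====
-- def get_lowest_price_item_id(table):
--     lowest_price = table[0][2]
--     result = ''
--     for item in table:
--         if item[2] < lowest_price:
--             lowest_price = item[2]
--     found_lowest = False
--     for item in table:
--         if item[2] == lowest_price and not found_lowest:
--             result = item[0]
--             found_lowest = True
--
--     return(result)
-- ===== SOURCE B (Python) =====
-- def get_lowest_price_item_id(table):
--     lowest_price = table[0][2]
--     result = table[0][0]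
--     for item in table:
--         if item[2] < lowest_price:
--             lowest_price = item[2]
--             result = item[0]
--     return result
-- ===== Notes on version B (the rewrite author's own statement) =====
-- stated objective: simpler
-- what changed: A's two passes (first find the minimum price, then rescan with a found-flag for the first id at that price) are replaced by a single pass that maintains the lowest price and its first id together, updating only on a strictly lower price.
import Mathlib
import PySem

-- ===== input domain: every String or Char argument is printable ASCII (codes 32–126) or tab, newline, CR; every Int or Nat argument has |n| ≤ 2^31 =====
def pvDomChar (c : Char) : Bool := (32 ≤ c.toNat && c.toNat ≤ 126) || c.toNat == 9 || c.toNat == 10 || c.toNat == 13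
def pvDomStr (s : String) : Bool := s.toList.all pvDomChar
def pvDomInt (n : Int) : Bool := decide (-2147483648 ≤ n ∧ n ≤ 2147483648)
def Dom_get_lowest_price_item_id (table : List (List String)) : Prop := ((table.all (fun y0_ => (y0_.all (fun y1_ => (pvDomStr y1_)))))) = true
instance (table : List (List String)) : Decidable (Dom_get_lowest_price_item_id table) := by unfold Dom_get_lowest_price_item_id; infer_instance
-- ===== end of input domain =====

-- B replaces A's two passes (min price, then first id at that price) by one pass maintaining
-- (lowest price, its first id) together; objective: simpler.

-- ===== PORT A =====
def get_lowest_price_item_id (table : List (List String)) : String :=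
  -- lowest_price = table[0][2]
  let lowest0 : String := (PySem.List.pyGet? ((PySem.List.pyGet? table 0).getD []) 2).getD ""
  -- first loop: minimum price
  let lowest : String := table.foldl
    (fun lp item => if (PySem.List.pyGet? item 2).getD "" < lp
                    then (PySem.List.pyGet? item 2).getD "" else lp) lowest0
  -- second loop: first id whose price equals the minimum (found flag)
  let st : String × Bool := table.foldl
    (fun (st : String × Bool) item =>
      if ((PySem.List.pyGet? item 2).getD "" == lowest) && !st.2
      then ((PySem.List.pyGet? item 0).getD "", true) else st) ("", false)
  st.1

-- ===== PORT B =====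
def get_lowest_price_item_id_alt (table : List (List String)) : String :=
  let first : List String := (PySem.List.pyGet? table 0).getD []
  let st : String × String := table.foldl
    (fun (st : String × String) item =>
      if (PySem.List.pyGet? item 2).getD "" < st.1
      then ((PySem.List.pyGet? item 2).getD "", (PySem.List.pyGet? item 0).getD "")
      else st)
    ((PySem.List.pyGet? first 2).getD "", (PySem.List.pyGet? first 0).getD "")
  st.2

-- ===== PRECONDITION & SPEC =====
-- Pre_ excludes exactly the inputs on which the Python A raises IndexError:
-- an empty table (table[0]) or a row with fewer than 3 cells (item[2]).
def Pre_get_lowest_price_item_id (table : List (List String)) : Prop :=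
  table ≠ [] ∧ ∀ row ∈ table, 3 ≤ row.length
instance (table : List (List String)) : Decidable (Pre_get_lowest_price_item_id table) := by
  unfold Pre_get_lowest_price_item_id; infer_instance
def pvWitness_get_lowest_price_item_id : List (List String) :=
  [["i1", "apple", "30"], ["i2", "pear", "12"], ["i3", "plum", "12"]]
def Spec_get_lowest_price_item_id (table : List (List String)) (out : String) : Prop := out = get_lowest_price_item_id_alt table
instance (table : List (List String)) (out : String) : Decidable (Spec_get_lowest_price_item_id table out) := by unfold Spec_get_lowest_price_item_id; infer_instance

-- ===== CLAIM (what is proved, stated in full; the proofs are below) =====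
def Claim_equal_get_lowest_price_item_id : Prop := ∀ (table : List (List String)), Dom_get_lowest_price_item_id table → Pre_get_lowest_price_item_id table → Spec_get_lowest_price_item_id table (get_lowest_price_item_id table)

-- ===== LEMMAS AND PROOFS =====

-- price and id of a row, as the ports read them
def pvPrice (item : List String) : String := (PySem.List.pyGet? item 2).getD ""
def pvId (item : List String) : String := (PySem.List.pyGet? item 0).getD ""

-- A's first loop
def pvMinF (l : List (List String)) (a : String) : String :=
  l.foldl (fun lp item => if pvPrice item < lp then pvPrice item else lp) a
-- A's second loop
def pvSndF (l : List (List String)) (m : String) (st : String × Bool) : String × Bool :=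
  l.foldl (fun st item => if (pvPrice item == m) && !st.2 then (pvId item, true) else st) st
-- B's loop
def pvBF (l : List (List String)) (st : String × String) : String × String :=
  l.foldl (fun st item => if pvPrice item < st.1 then (pvPrice item, pvId item) else st) st

theorem pvMinF_cons (h : List String) (t : List (List String)) (a : String) :
    pvMinF (h :: t) a = pvMinF t (if pvPrice h < a then pvPrice h else a) := rfl

theorem pvSndF_cons (h : List String) (t : List (List String)) (m : String) (st : String × Bool) :
    pvSndF (h :: t) m st = pvSndF t m (if (pvPrice h == m) && !st.2 then (pvId h, true) else st) := rfl

theorem pvBF_cons (h : List String) (t : List (List String)) (a r : String) :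
    pvBF (h :: t) (a, r) = pvBF t (if pvPrice h < a then (pvPrice h, pvId h) else (a, r)) := rfl

theorem pvMinF_le (l : List (List String)) : ∀ a : String, pvMinF l a ≤ a := by
  induction l with
  | nil => intro a; simp [pvMinF]
  | cons h t ih =>
    intro a
    rw [pvMinF_cons]
    by_cases hlt : pvPrice h < a
    · rw [if_pos hlt]
      exact le_of_lt (lt_of_le_of_lt (ih (pvPrice h)) hlt)
    · rw [if_neg hlt]; exact ih a

theorem pvMinF_ach (l : List (List String)) :
    ∀ a : String, pvMinF l a = a ∨ ∃ item ∈ l, pvMinF l a = pvPrice item := by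
  induction l with
  | nil => intro a; left; simp [pvMinF]
  | cons h t ih =>
    intro a
    rw [pvMinF_cons]
    by_cases hlt : pvPrice h < a
    · rw [if_pos hlt]
      rcases ih (pvPrice h) with he | ⟨it, hit, he⟩
      · right; exact ⟨h, by simp, he⟩
      · right; exact ⟨it, by simp [hit], he⟩
    · rw [if_neg hlt]
      rcases ih a with he | ⟨it, hit, he⟩
      · left; exact he
      · right; exact ⟨it, by simp [hit], he⟩

theorem pvSndF_true (l : List (List String)) (m r : String) :
    pvSndF l m (r, true) = (r, true) := by
  induction l with
  | nil => simp [pvSndF]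
  | cons h t ih =>
    rw [pvSndF_cons]
    rw [if_neg (by simp)]
    exact ih

theorem pvSndF_find (l : List (List String)) (m : String) :
    pvSndF l m ("", false) =
      match l.find? (fun item => pvPrice item == m) with
      | some it => (pvId it, true)
      | none => ("", false) := by
  induction l with
  | nil => simp [pvSndF]
  | cons h t ih =>
    rw [pvSndF_cons]
    by_cases hm : pvPrice h = m
    · have hc : ((pvPrice h == m) && !(("", false) : String × Bool).2) = true := by simp [hm]
      rw [if_pos hc, pvSndF_true, List.find?_cons_of_pos (by simpa using hm)]
    · have hc : ((pvPrice h == m) && !(("", false) : String × Bool).2) = false := by simp [hm]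
      rw [if_neg (by simp [hm]), List.find?_cons_of_neg (by simp [hm])]
      exact ih

theorem pvBF_eq (l : List (List String)) :
    ∀ a r : String, pvBF l (a, r) =
      (pvMinF l a,
       if pvMinF l a < a
       then ((l.find? (fun item => pvPrice item == pvMinF l a)).map pvId).getD r
       else r) := by
  induction l with
  | nil => intro a r; simp [pvBF, pvMinF]
  | cons h t ih =>
    intro a r
    rw [pvBF_cons, pvMinF_cons]
    by_cases hlt : pvPrice h < a
    · rw [if_pos hlt, if_pos hlt, ih (pvPrice h) (pvId h)]
      have hle := pvMinF_le t (pvPrice h)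
      by_cases h2 : pvMinF t (pvPrice h) < pvPrice h
      · -- the minimum is achieved strictly inside t
        have hne : pvPrice h ≠ pvMinF t (pvPrice h) := ne_of_gt h2
        have hfind : ∃ x, t.find? (fun item => pvPrice item == pvMinF t (pvPrice h)) = some x := by
          rcases pvMinF_ach t (pvPrice h) with he | ⟨it, hit, he⟩
          · exact absurd he.symm hne
          · have : (t.find? (fun item => pvPrice item == pvMinF t (pvPrice h))).isSome := by
              rw [List.find?_isSome]
              exact ⟨it, hit, by simp [he]⟩
            exact Option.isSome_iff_exists.mp this
        rcases hfind with ⟨x, hx⟩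
        have houter : pvMinF t (pvPrice h) < a := lt_trans h2 hlt
        rw [if_pos h2, if_pos houter, List.find?_cons_of_neg (by simp [hne]), hx]
        simp
      · -- minimum equals the head price: the head achieves it
        have heq : pvMinF t (pvPrice h) = pvPrice h := le_antisymm hle (not_lt.mp h2)
        rw [if_neg h2, heq, if_pos hlt,
          List.find?_cons_of_pos (by simp)]
        simp
    · rw [if_neg hlt, if_neg hlt, ih a r]
      have hle := pvMinF_le t a
      by_cases h2 : pvMinF t a < a
      · have hne : pvPrice h ≠ pvMinF t a := fun he => hlt (he ▸ h2)
        rw [if_pos h2, if_pos h2, List.find?_cons_of_neg (by simp [hne])]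
      · rw [if_neg h2, if_neg h2]

-- ===== VERDICT (by name: the statement is the Claim_ definition above) =====
theorem get_lowest_price_item_id_spec : Claim_equal_get_lowest_price_item_id := by
  intro table _ hpre
  unfold Spec_get_lowest_price_item_id
  obtain ⟨hne, -⟩ := hpre
  obtain ⟨h, t, rfl⟩ := List.exists_cons_of_ne_nil hne
  have hA : get_lowest_price_item_id (h :: t)
      = (pvSndF (h :: t) (pvMinF (h :: t) (pvPrice h)) ("", false)).1 := by
    simp only [get_lowest_price_item_id, pvSndF, pvMinF, pvPrice, pvId,
      PySem.List.pyGet?_zero_cons, Option.getD_some]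
  have hB : get_lowest_price_item_id_alt (h :: t)
      = (pvBF (h :: t) (pvPrice h, pvId h)).2 := by
    simp only [get_lowest_price_item_id_alt, pvBF, pvPrice, pvId,
      PySem.List.pyGet?_zero_cons, Option.getD_some]
  rw [hA, hB, pvSndF_find, pvBF_eq]
  have hle : pvMinF (h :: t) (pvPrice h) ≤ pvPrice h := pvMinF_le (h :: t) (pvPrice h)
  by_cases hlt : pvMinF (h :: t) (pvPrice h) < pvPrice h
  · -- the minimum is strictly below the head price: find? succeeds in (h :: t)
    have hne' : pvPrice h ≠ pvMinF (h :: t) (pvPrice h) := ne_of_gt hlt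
    have hfind : ∃ x, (h :: t).find? (fun item => pvPrice item == pvMinF (h :: t) (pvPrice h)) = some x := by
      rcases pvMinF_ach (h :: t) (pvPrice h) with he | ⟨it, hit, he⟩
      · exact absurd he.symm hne'
      · have : ((h :: t).find? (fun item => pvPrice item == pvMinF (h :: t) (pvPrice h))).isSome := by
          rw [List.find?_isSome]
          exact ⟨it, hit, by simp [he]⟩
        exact Option.isSome_iff_exists.mp this
    rcases hfind with ⟨x, hx⟩
    rw [if_pos hlt, hx]
    simp
  · -- minimum equals the head price: both return the head id
    have heq : pvMinF (h :: t) (pvPrice h) = pvPrice h := le_antisymm hle (not_lt.mp hlt)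
    rw [if_neg hlt, heq, List.find?_cons_of_pos (by simp)]
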